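-- pv_equiv track=rewrite | github.com/zou3519/pytorch | tools/vmap/gen_vmap.py | tensor_inputs_come_first
-- ===== SOURCE A (Python) =====
-- def tensor_inputs_come_first(decl):
--     formals = decl['formals']
--     is_tensor_formal = [1 if 'Tensor' in formal else 0 for formal in formals]
--     no_tensors = False
--     for is_tensor in is_tensor_formal:
--         if no_tensors and is_tensor:
--             return False
--         if not is_tensor:
--             no_tensors = True
--     return True
-- ===== SOURCE B (Python) =====
-- def tensor_inputs_come_first(decl):
--     formals = decl['formals']
--     tensors = [f for f in formals if 'Tensor' in f]
--     return formals[:len(tensors)] == tensors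
-- ===== Notes on version B (the rewrite author's own statement) =====
-- stated objective: simpler
-- what changed: Replaces the stateful single-pass scan with its no_tensors flag and early return by a summarize-then-compare decomposition: filter out the tensor formals and check they occupy the leading prefix of the formals list.
-- outside the precondition, e.g. on tensor_inputs_come_first({}): A raises KeyError, B raises KeyError
import Mathlib
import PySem

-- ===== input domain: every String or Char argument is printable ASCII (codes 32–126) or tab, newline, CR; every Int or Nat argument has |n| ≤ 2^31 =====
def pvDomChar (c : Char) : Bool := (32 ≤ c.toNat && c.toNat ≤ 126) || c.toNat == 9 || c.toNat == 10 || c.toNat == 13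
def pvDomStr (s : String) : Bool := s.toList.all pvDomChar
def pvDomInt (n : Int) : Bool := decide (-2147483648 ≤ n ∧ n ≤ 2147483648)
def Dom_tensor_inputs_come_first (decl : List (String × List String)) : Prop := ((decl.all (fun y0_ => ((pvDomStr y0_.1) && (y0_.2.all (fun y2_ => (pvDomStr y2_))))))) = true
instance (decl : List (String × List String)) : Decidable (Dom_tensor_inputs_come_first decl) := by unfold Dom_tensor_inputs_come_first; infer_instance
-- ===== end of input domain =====

-- B replaces A's stateful flag-and-early-return scan by "filter the tensor formals, compare with the prefix" (objective: simpler).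

-- ===== PORT A =====
-- the loop `for is_tensor in is_tensor_formal: …` with its `no_tensors` flag and early `return False`
def pyLoopA : List Int → Bool → Bool
  | [], _ => true
  | is_tensor :: rest, no_tensors =>
      if no_tensors && (is_tensor != 0) then false
      else pyLoopA rest (if is_tensor == 0 then true else no_tensors)

def tensor_inputs_come_first (decl : List (String × List String)) : Bool :=
  match (PySem.Dict.mk decl).get? "formals" with    -- decl['formals']; KeyError (excluded by Pre_) if absent
  | none => false
  | some formals =>
      let is_tensor_formal := formals.map (fun formal => if PySem.Str.isIn "Tensor" formal then (1 : Int) else 0)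
      pyLoopA is_tensor_formal false

-- ===== PORT B =====
def tensor_inputs_come_first_alt (decl : List (String × List String)) : Bool :=
  match (PySem.Dict.mk decl).get? "formals" with    -- decl['formals']; KeyError (excluded by Pre_) if absent
  | none => false
  | some formals =>
      let tensors := formals.filter (fun f => PySem.Str.isIn "Tensor" f)
      PySem.List.slice formals none (some (tensors.length : Int)) == tensors

-- ===== PRECONDITION & SPEC =====
-- Pre_ excludes exactly the dicts without a 'formals' key, on which both Pythons raise KeyError.
def Pre_tensor_inputs_come_first (decl : List (String × List String)) : Prop :=
  "formals" ∈ decl.map Prod.fst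
instance (decl : List (String × List String)) : Decidable (Pre_tensor_inputs_come_first decl) := by
  unfold Pre_tensor_inputs_come_first; infer_instance
def pvWitness_tensor_inputs_come_first : (List (String × List String)) :=
  [("formals", ["Tensor self", "int dim"])]

def Spec_tensor_inputs_come_first (decl : List (String × List String)) (out : Bool) : Prop := out = tensor_inputs_come_first_alt decl
instance (decl : List (String × List String)) (out : Bool) : Decidable (Spec_tensor_inputs_come_first decl out) := by unfold Spec_tensor_inputs_come_first; infer_instance

-- ===== CLAIM =====
def Claim_equal_tensor_inputs_come_first : Prop := ∀ (decl : List (String × List String)), Dom_tensor_inputs_come_first decl → Pre_tensor_inputs_come_first decl → Spec_tensor_inputs_come_first decl (tensor_inputs_come_first decl)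

-- ===== LEMMAS AND PROOFS =====

-- once `no_tensors` is set, the loop accepts iff no tensor formal remains
theorem pyLoopA_true (p : String → Bool) (l : List String) :
    pyLoopA (l.map (fun f => if p f then (1 : Int) else 0)) true = (l.filter p).isEmpty := by
  induction l with
  | nil => rfl
  | cons h t ih =>
      by_cases hp : p h <;> simp [pyLoopA, hp, ih]

-- from the initial state the loop accepts iff the tensor formals occupy the prefix
theorem pyLoopA_false (p : String → Bool) (l : List String) :
    pyLoopA (l.map (fun f => if p f then (1 : Int) else 0)) false
      = (l.take (l.filter p).length == l.filter p) := by
  induction l with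
  | nil => rfl
  | cons h t ih =>
      by_cases hp : p h
      · simp [pyLoopA, hp, ih]
      · simp only [List.map_cons, hp, pyLoopA, List.filter_cons, Bool.false_eq_true, if_false,
          bne_self_eq_false, Bool.and_false, beq_self_eq_true, if_true]
        rw [pyLoopA_true p t]
        cases hft : t.filter p with
        | nil => simp
        | cons f0 rest =>
            have hpf0 : p f0 = true := by
              have : f0 ∈ t.filter p := by rw [hft]; exact List.mem_cons_self
              exact (List.mem_filter.mp this).2
            have hne : (h == f0) = false := by
              simp only [beq_eq_false_iff_ne, ne_eq]
              intro he; rw [he, hpf0] at hp; exact hp rfl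
            simp [hne]

-- ===== VERDICT =====
theorem tensor_inputs_come_first_spec : Claim_equal_tensor_inputs_come_first := by
  intro decl _hd _hp
  unfold Spec_tensor_inputs_come_first tensor_inputs_come_first tensor_inputs_come_first_alt
  cases h : (PySem.Dict.mk decl).get? "formals" with
  | none => rfl
  | some formals =>
      simp only []
      rw [pyLoopA_false, PySem.List.slice_to_natCast]
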